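-- pv_equiv track=rewrite | github.com/RyanButterick/cfa-dashboard | src/processing/ranker.py | _credibility_score
-- ===== SOURCE A (Python) =====
-- _SOURCE_CREDIBILITY = {
--     # Tier 1: Wire services and premium financial press
--     "Reuters": 10, "Bloomberg": 10, "The Wall Street Journal": 10,
--     "WSJ": 10, "Financial Times": 10, "FT": 10, "Dow Jones": 10,
--     "Associated Press": 9, "AP News": 9,
--     # Tier 2: Major business outlets
--     "CNBC": 7, "MarketWatch": 7, "Barron's": 7, "The Economist": 7,
--     "BBC": 7, "BBC News": 7, "NPR": 7, "The New York Times": 7,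
--     "The Washington Post": 7, "CNN": 7, "CNN Business": 7,
--     "Seeking Alpha": 6, "Morningstar": 7,
--     # Tier 3: General/aggregator sources
--     "Yahoo Finance": 4, "Yahoo! Finance": 4, "Business Insider": 4,
--     "Forbes": 4, "Investopedia": 4, "The Motley Fool": 3,
--     "Benzinga": 4, "Zacks": 4, "TheStreet": 4,
--     "TipRanks": 4, "24/7 Wall St.": 3, "InvestorPlace": 3,
--     # SEC filings (neutral — scored via source_type instead)
--     "SEC": 5, "SEC EDGAR": 5,
-- }
--
-- _CREDIBILITY_DEFAULT = 2  # Unknown sources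
--
-- def _credibility_score(source_name: str) -> float:
--     """Look up source credibility score from the tier mapping.
--
--     Performs case-insensitive partial matching so 'reuters.com' still
--     matches 'Reuters' and 'The Wall Street Journal Online' matches 'WSJ'.
--
--     Args:
--         source_name: Name of the news source.
--
--     Returns:
--         Credibility score between 0 and _CREDIBILITY_MAX.
--     """
--     if not source_name:
--         return _CREDIBILITY_DEFAULT
--
--     # Try exact match first (case-insensitive)
--     for known, score in _SOURCE_CREDIBILITY.items():
--         if known.lower() == source_name.lower():
--             return score
--
--     # Try partial match (source name contains a known name)
--     source_lower = source_name.lower()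
--     for known, score in _SOURCE_CREDIBILITY.items():
--         if known.lower() in source_lower or source_lower in known.lower():
--             return score
--
--     return _CREDIBILITY_DEFAULT
-- ===== SOURCE B (Python) =====
-- _SOURCE_CREDIBILITY = {
--     "Reuters": 10, "Bloomberg": 10, "The Wall Street Journal": 10,
--     "WSJ": 10, "Financial Times": 10, "FT": 10, "Dow Jones": 10,
--     "Associated Press": 9, "AP News": 9,
--     "CNBC": 7, "MarketWatch": 7, "Barron's": 7, "The Economist": 7,
--     "BBC": 7, "BBC News": 7, "NPR": 7, "The New York Times": 7,
--     "The Washington Post": 7, "CNN": 7, "CNN Business": 7,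
--     "Seeking Alpha": 6, "Morningstar": 7,
--     "Yahoo Finance": 4, "Yahoo! Finance": 4, "Business Insider": 4,
--     "Forbes": 4, "Investopedia": 4, "The Motley Fool": 3,
--     "Benzinga": 4, "Zacks": 4, "TheStreet": 4,
--     "TipRanks": 4, "24/7 Wall St.": 3, "InvestorPlace": 3,
--     "SEC": 5, "SEC EDGAR": 5,
-- }
--
-- _CREDIBILITY_DEFAULT = 2
--
--
-- def _credibility_score(source_name: str) -> float:
--     """Single pass: record the first exact and first partial candidate,
--     then prefer exact over partial over the default."""
--     if not source_name:
--         return _CREDIBILITY_DEFAULT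
--     source_lower = source_name.lower()
--     exact = None
--     partial = None
--     for known, score in _SOURCE_CREDIBILITY.items():
--         known_lower = known.lower()
--         if exact is None and known_lower == source_lower:
--             exact = score
--         if partial is None and (known_lower in source_lower or source_lower in known_lower):
--             partial = score
--     if exact is not None:
--         return exact
--     if partial is not None:
--         return partial
--     return _CREDIBILITY_DEFAULT
-- ===== Notes on version B (the rewrite author's own statement) =====
-- stated objective: alternative
-- what changed: A's two sequential scans of the credibility table (an exact-match pass, then a partial-match pass) are collapsed into one pass that records the first exact and first partial candidate and picks exact over partial over the default.
import Mathlib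
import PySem

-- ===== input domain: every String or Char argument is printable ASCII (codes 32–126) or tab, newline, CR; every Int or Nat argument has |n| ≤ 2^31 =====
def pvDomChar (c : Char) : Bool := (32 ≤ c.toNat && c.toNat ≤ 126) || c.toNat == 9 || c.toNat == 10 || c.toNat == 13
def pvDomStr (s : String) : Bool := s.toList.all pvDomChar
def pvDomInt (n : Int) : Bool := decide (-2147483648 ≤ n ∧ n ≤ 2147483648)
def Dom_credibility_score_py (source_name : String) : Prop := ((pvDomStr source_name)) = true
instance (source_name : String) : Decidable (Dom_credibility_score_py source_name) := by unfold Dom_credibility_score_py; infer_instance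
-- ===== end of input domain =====

-- B makes a single pass over the table keeping the first exact and first partial candidates,
-- instead of A's two separate scans; same return value everywhere (objective: alternative decomposition).

-- ===== PORT A =====
-- the module dict _SOURCE_CREDIBILITY, in insertion order
def credTable : List (String × Int) :=
  [("Reuters", 10), ("Bloomberg", 10), ("The Wall Street Journal", 10),
   ("WSJ", 10), ("Financial Times", 10), ("FT", 10), ("Dow Jones", 10),
   ("Associated Press", 9), ("AP News", 9),
   ("CNBC", 7), ("MarketWatch", 7), ("Barron's", 7), ("The Economist", 7),
   ("BBC", 7), ("BBC News", 7), ("NPR", 7), ("The New York Times", 7),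
   ("The Washington Post", 7), ("CNN", 7), ("CNN Business", 7),
   ("Seeking Alpha", 6), ("Morningstar", 7),
   ("Yahoo Finance", 4), ("Yahoo! Finance", 4), ("Business Insider", 4),
   ("Forbes", 4), ("Investopedia", 4), ("The Motley Fool", 3),
   ("Benzinga", 4), ("Zacks", 4), ("TheStreet", 4),
   ("TipRanks", 4), ("24/7 Wall St.", 3), ("InvestorPlace", 3),
   ("SEC", 5), ("SEC EDGAR", 5)]

-- A's first loop: exact case-insensitive match, early return
def credExactLoop (source_name : String) : List (String × Int) → Option Int
  | [] => none
  | (known, score) :: rest =>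
    if PySem.Str.lower known == PySem.Str.lower source_name then some score
    else credExactLoop source_name rest

-- A's second loop: partial containment match, early return
def credPartialLoop (source_lower : String) : List (String × Int) → Option Int
  | [] => none
  | (known, score) :: rest =>
    if PySem.Str.isIn (PySem.Str.lower known) source_lower
       || PySem.Str.isIn source_lower (PySem.Str.lower known) then some score
    else credPartialLoop source_lower rest

def credibility_score_py (source_name : String) : Int :=
  if source_name == "" then 2
  else
    match credExactLoop source_name credTable with
    | some score => score
    | none =>
      let source_lower := PySem.Str.lower source_name
      match credPartialLoop source_lower credTable with
      | some score => score
      | none => 2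

-- ===== PORT B =====
-- one step of B's single scan: record the first exact and the first partial candidate
def credScanStep (source_lower : String) (st : Option Int × Option Int)
    (kv : String × Int) : Option Int × Option Int :=
  let known_lower := PySem.Str.lower kv.1
  (if st.1.isNone && (known_lower == source_lower) then some kv.2 else st.1,
   if st.2.isNone && (PySem.Str.isIn known_lower source_lower
                      || PySem.Str.isIn source_lower known_lower) then some kv.2 else st.2)

def credibility_score_py_alt (source_name : String) : Int :=
  if source_name == "" then 2
  else
    let source_lower := PySem.Str.lower source_name
    let st := credTable.foldl (credScanStep source_lower) (none, none)
    match st.1 with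
    | some e => e
    | none =>
      match st.2 with
      | some p => p
      | none => 2

-- ===== PRECONDITION & SPEC =====
def Spec_credibility_score_py (source_name : String) (out : Int) : Prop := out = credibility_score_py_alt source_name
instance (source_name : String) (out : Int) : Decidable (Spec_credibility_score_py source_name out) := by unfold Spec_credibility_score_py; infer_instance

-- ===== CLAIM (what is proved, stated in full; the proofs are below) =====
def Claim_equal_credibility_score_py : Prop := ∀ (source_name : String), Dom_credibility_score_py source_name → Spec_credibility_score_py source_name (credibility_score_py source_name)

-- ===== LEMMAS AND PROOFS =====

-- the first component of B's scan is A's first loop (seeded with any already-found candidate)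
lemma credScan_fst (src : String) (l : List (String × Int)) (e p : Option Int) :
    (l.foldl (credScanStep (PySem.Str.lower src)) (e, p)).1 =
      (match e with | some x => some x | none => credExactLoop src l) := by
  induction l generalizing e p with
  | nil => cases e <;> simp [credExactLoop]
  | cons kv rest ih =>
    obtain ⟨k, v⟩ := kv
    rw [List.foldl_cons, ih]
    cases e with
    | some x => simp [credScanStep]
    | none =>
      simp only [credScanStep, Option.isNone_none, Bool.true_and]
      cases hc : (PySem.Str.lower k == PySem.Str.lower src) with
      | true => simp [credExactLoop, hc]
      | false => simp [credExactLoop, hc]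

-- the second component of B's scan is A's second loop
lemma credScan_snd (sl : String) (l : List (String × Int)) (e p : Option Int) :
    (l.foldl (credScanStep sl) (e, p)).2 =
      (match p with | some x => some x | none => credPartialLoop sl l) := by
  induction l generalizing e p with
  | nil => cases p <;> simp [credPartialLoop]
  | cons kv rest ih =>
    obtain ⟨k, v⟩ := kv
    rw [List.foldl_cons, ih]
    cases p with
    | some x => simp [credScanStep]
    | none =>
      simp only [credScanStep, Option.isNone_none, Bool.true_and]
      cases hc : (PySem.Str.isIn (PySem.Str.lower k) sl
          || PySem.Str.isIn sl (PySem.Str.lower k)) with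
      | true =>
        simp [credPartialLoop]
        intro ha hb
        simp [ha, hb] at hc
      | false =>
        simp only [Bool.or_eq_false_iff, PySem.Str.isIn_eq, PySem.Str.toList_lower] at hc
        simp [credPartialLoop, hc.1, hc.2]

-- ===== VERDICT (by name: the statement is the Claim_ definition above) =====
theorem credibility_score_py_spec : Claim_equal_credibility_score_py := by
  intro s _
  unfold Spec_credibility_score_py credibility_score_py credibility_score_py_alt
  by_cases hs : (s == "") = true
  · simp [hs]
  · rw [if_neg hs, if_neg hs]
    simp only [credScan_fst, credScan_snd]
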